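-- pv_equiv track=rewrite | github.com/BYU-CSA/old-ctf-challenges | cryptography/b-z then 10/base21-20.py | base_21_to_base_20
-- ===== SOURCE A (Python) =====
-- def base_21_to_base_20(number):
--     decimal = 0
--     power = 0
--     for digit in number[::-1]:
--         if digit.isdigit():
--             decimal += int(digit) * (21 ** power)
--         else:
--             decimal += (ord(digit) - 55) * (21 ** power)
--         power += 1
--     result = ''
--     while decimal > 0:
--         remainder = decimal % 20
--         if remainder < 10:
--             result = str(remainder) + result
--         else:
--             result = chr(55 + remainder) + result
--         decimal = decimal // 20
--     return result
-- ===== SOURCE B (Python) =====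
-- def base_21_to_base_20(number):
--     # Horner's method: one multiply-add per digit instead of recomputing 21**power,
--     # and digits collected in a list (joined once) instead of repeated string prepends.
--     decimal = 0
--     for digit in number:
--         if digit.isdigit():
--             v = int(digit)
--         else:
--             v = ord(digit) - 55
--         decimal = decimal * 21 + v
--     digits = []
--     while decimal > 0:
--         decimal, r = divmod(decimal, 20)
--         digits.append(str(r) if r < 10 else chr(55 + r))
--     return ''.join(reversed(digits))
-- ===== Notes on version B (the rewrite author's own statement) =====
-- stated objective: faster
-- what changed: Parsing uses Horner's method (decimal = decimal*21 + digit over the string, forward) instead of recomputing 21**power for every position over the reversed string, and the base-20 digits are collected in a list and joined once instead of repeated string prepending.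
import Mathlib
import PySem

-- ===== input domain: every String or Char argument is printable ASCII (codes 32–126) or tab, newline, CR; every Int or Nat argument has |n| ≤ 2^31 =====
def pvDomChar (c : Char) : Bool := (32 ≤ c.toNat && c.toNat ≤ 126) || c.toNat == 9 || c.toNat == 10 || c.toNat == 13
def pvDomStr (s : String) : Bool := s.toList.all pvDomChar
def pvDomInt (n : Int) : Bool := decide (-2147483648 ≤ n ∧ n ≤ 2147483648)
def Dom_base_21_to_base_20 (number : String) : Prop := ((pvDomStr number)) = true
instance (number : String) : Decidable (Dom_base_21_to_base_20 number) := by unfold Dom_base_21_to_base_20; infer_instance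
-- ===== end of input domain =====

-- B replaces A's per-position 21**power recomputation by Horner's method and the
-- repeated string prepending by a digit list joined once (objective: faster).

-- ===== PORT A =====
-- A's while loop: result is built by prepending str(remainder) / chr(55+remainder).
-- str(remainder) (0 ≤ remainder < 10 there) is PySem.Int.toChars; chr(55+remainder)
-- (10 ≤ remainder < 20 there, so 55+remainder is a valid code) is Char.ofNat — exact.
def pvALoop (decimal : Int) (result : List Char) : List Char :=
  if decimal > 0 then
    let remainder := PySem.Int.mod decimal 20
    let result' :=
      if remainder < 10 then PySem.Int.toChars remainder ++ result
      else [Char.ofNat (55 + remainder).toNat] ++ result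
    pvALoop (PySem.Int.floordiv decimal 20) result'
  else result
termination_by decimal.toNat
decreasing_by
  simp only [PySem.Int.floordiv_eq_ediv_of_pos (by omega : (0:Int) < 20)]
  omega

-- int(digit) for a single ASCII digit character is its code minus 48 — exact on Dom.
def base_21_to_base_20 (number : String) : String :=
  let rev := ((PySem.Str.slice? number none none (-1)).getD "").toList  -- number[::-1]
  let st := rev.foldl (fun (st : Int × Nat) digit =>
      if PySem.Chars.isdigit digit then
        (st.1 + ((digit.toNat : Int) - 48) * 21 ^ st.2, st.2 + 1)
      else
        (st.1 + ((digit.toNat : Int) - 55) * 21 ^ st.2, st.2 + 1)) (0, 0)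
  String.ofList (pvALoop st.1 [])

-- ===== PORT B =====
-- B's while loop: each appended piece is str(r) or chr(55+r) (same exact ports as above);
-- ''.join(reversed(digits)) is the flatten of the reversed piece list.
def pvBLoop (decimal : Int) (digits : List (List Char)) : List (List Char) :=
  if decimal > 0 then
    let q := PySem.Int.floordiv decimal 20
    let r := PySem.Int.mod decimal 20
    pvBLoop q (digits ++ [if r < 10 then PySem.Int.toChars r else [Char.ofNat (55 + r).toNat]])
  else digits
termination_by decimal.toNat
decreasing_by
  simp only [PySem.Int.floordiv_eq_ediv_of_pos (by omega : (0:Int) < 20)]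
  omega

def base_21_to_base_20_alt (number : String) : String :=
  let decimal := number.toList.foldl (fun d digit =>
      d * 21 + (if PySem.Chars.isdigit digit then ((digit.toNat : Int) - 48)
                else ((digit.toNat : Int) - 55))) 0
  String.ofList ((pvBLoop decimal []).reverse.flatten)

-- ===== PRECONDITION & SPEC =====
def Spec_base_21_to_base_20 (number : String) (out : String) : Prop := out = base_21_to_base_20_alt number
instance (number : String) (out : String) : Decidable (Spec_base_21_to_base_20 number out) := by unfold Spec_base_21_to_base_20; infer_instance

-- ===== CLAIM (what is proved, stated in full; the proofs are below) =====
def Claim_equal_base_21_to_base_20 : Prop := ∀ (number : String), Dom_base_21_to_base_20 number → Spec_base_21_to_base_20 number (base_21_to_base_20 number)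

-- ===== LEMMAS AND PROOFS =====

def pvVal (c : Char) : Int :=
  if PySem.Chars.isdigit c then ((c.toNat : Int) - 48) else ((c.toNat : Int) - 55)

-- big-endian value of a digit string
def pvS : List Char → Int
  | [] => 0
  | c :: t => pvVal c * 21 ^ t.length + pvS t

-- little-endian value starting at power p (what A's fold accumulates)
def pvT : List Char → Nat → Int
  | [], _ => 0
  | c :: t, p => pvVal c * 21 ^ p + pvT t (p + 1)

theorem pvHorner (l : List Char) : ∀ a : Int,
    l.foldl (fun d digit =>
      d * 21 + (if PySem.Chars.isdigit digit then ((digit.toNat : Int) - 48)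
                else ((digit.toNat : Int) - 55))) a
    = a * 21 ^ l.length + pvS l := by
  induction l with
  | nil => intro a; simp [pvS]
  | cons c t ih =>
    intro a
    simp only [List.foldl_cons, ih, pvS, List.length_cons, pvVal]
    ring

theorem pvAfold (l : List Char) : ∀ (d : Int) (p : Nat),
    (l.foldl (fun (st : Int × Nat) digit =>
      if PySem.Chars.isdigit digit then
        (st.1 + ((digit.toNat : Int) - 48) * 21 ^ st.2, st.2 + 1)
      else
        (st.1 + ((digit.toNat : Int) - 55) * 21 ^ st.2, st.2 + 1)) (d, p)).1
    = d + pvT l p := by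
  induction l with
  | nil => intro d p; simp [pvT]
  | cons c t ih =>
    intro d p
    by_cases h : PySem.Chars.isdigit c <;>
      simp [h, List.foldl_cons, ih, pvT, pvVal] <;> ring

theorem pvT_append (xs : List Char) (c : Char) : ∀ p,
    pvT (xs ++ [c]) p = pvT xs p + pvVal c * 21 ^ (p + xs.length) := by
  induction xs with
  | nil => intro p; simp [pvT]
  | cons x t ih =>
    intro p
    simp only [List.cons_append, pvT, ih, List.length_cons]
    ring_nf

theorem pvT_reverse (l : List Char) : ∀ p, pvT l.reverse p = pvS l * 21 ^ p := by
  induction l with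
  | nil => intro p; simp [pvT, pvS]
  | cons c t ih =>
    intro p
    simp only [List.reverse_cons, pvT_append, ih, pvS, List.length_reverse]
    ring

theorem pvBLoop_acc_aux : ∀ (n : Nat) (d : Int), d.toNat ≤ n → ∀ digits,
    pvBLoop d digits = digits ++ pvBLoop d [] := by
  intro n
  induction n with
  | zero =>
    intro d hle digits
    have hd : ¬ d > 0 := by omega
    rw [pvBLoop, if_neg hd, pvBLoop, if_neg hd, List.append_nil]
  | succ n ih =>
    intro d hle digits
    by_cases hd : d > 0
    · have hq : (PySem.Int.floordiv d 20).toNat ≤ n := by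
        rw [PySem.Int.floordiv_eq_ediv_of_pos (by omega : (0:Int) < 20)]
        omega
      conv_lhs => rw [pvBLoop]
      conv_rhs => rw [pvBLoop]
      simp only [if_pos hd]
      rw [ih _ hq]
      conv_rhs => rw [ih _ hq]
      simp
    · rw [pvBLoop, if_neg hd, pvBLoop, if_neg hd, List.append_nil]

theorem pvALoop_eq_aux : ∀ (n : Nat) (d : Int), d.toNat ≤ n → ∀ result,
    pvALoop d result = (pvBLoop d []).reverse.flatten ++ result := by
  intro n
  induction n with
  | zero =>
    intro d hle result
    have hd : ¬ d > 0 := by omega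
    rw [pvALoop, if_neg hd, pvBLoop, if_neg hd]
    simp
  | succ n ih =>
    intro d hle result
    by_cases hd : d > 0
    · have hq : (PySem.Int.floordiv d 20).toNat ≤ n := by
        rw [PySem.Int.floordiv_eq_ediv_of_pos (by omega : (0:Int) < 20)]
        omega
      conv_lhs => rw [pvALoop]
      conv_rhs => rw [pvBLoop]
      simp only [if_pos hd]
      rw [ih _ hq]
      conv_rhs => rw [pvBLoop_acc_aux n _ hq]
      simp
      split <;> simp
    · rw [pvALoop, if_neg hd, pvBLoop, if_neg hd]
      simp

-- ===== VERDICT (by name: the statement is the Claim_ definition above) =====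
theorem base_21_to_base_20_spec : Claim_equal_base_21_to_base_20 := by
  intro number _
  unfold Spec_base_21_to_base_20 base_21_to_base_20 base_21_to_base_20_alt
  rw [PySem.Str.slice?_none_none_neg_one]
  simp only [Option.getD_some, pvHorner, pvAfold]
  rw [pvALoop_eq_aux (0 + pvT (String.ofList number.toList.reverse).toList 0).toNat _ le_rfl, List.append_nil]
  rw [String.toList_ofList, pvT_reverse]
  simp
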